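-- pv_equiv track=rewrite | github.com/babiswas/Array | find_count.py | find_count
-- ===== SOURCE A (Python) =====
-- def find_count(arr,K):
--     test=1
--     count=0
--     for i in range(len(arr)):
--        test*=arr[i]
--        if test==K:
--           count+=1
--        if i+1<len(arr):
--           for j in range(i+1,len(arr)):
--               test*=arr[j]
--               if test==K:
--                  count+=1
--           test=1
--     return count
-- ===== SOURCE B (Python) =====
-- def find_count(arr, K):
--     # Group subarrays by their END index: maintain a counter mapping
--     # product -> number of subarrays ending at the previous index with that product.
--     count = 0
--     prods = {}
--     for x in arr:
--         new = {}
--         for p, c in prods.items():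
--             q = p * x
--             new[q] = new.get(q, 0) + c
--         new[x] = new.get(x, 0) + 1
--         prods = new
--         count += prods.get(K, 0)
--     return count
-- ===== Notes on version B (the rewrite author's own statement) =====
-- stated objective: alternative
-- what changed: B groups subarrays by end index and maintains a hash counter mapping each distinct suffix product to how many subarrays ending at the previous index have it, adding the counter's entry for K at each step, instead of A's nested start-indexed loops recomputing running products; equal products (e.g. after zeros or ones) collapse to one counter entry.
import Mathlib
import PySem

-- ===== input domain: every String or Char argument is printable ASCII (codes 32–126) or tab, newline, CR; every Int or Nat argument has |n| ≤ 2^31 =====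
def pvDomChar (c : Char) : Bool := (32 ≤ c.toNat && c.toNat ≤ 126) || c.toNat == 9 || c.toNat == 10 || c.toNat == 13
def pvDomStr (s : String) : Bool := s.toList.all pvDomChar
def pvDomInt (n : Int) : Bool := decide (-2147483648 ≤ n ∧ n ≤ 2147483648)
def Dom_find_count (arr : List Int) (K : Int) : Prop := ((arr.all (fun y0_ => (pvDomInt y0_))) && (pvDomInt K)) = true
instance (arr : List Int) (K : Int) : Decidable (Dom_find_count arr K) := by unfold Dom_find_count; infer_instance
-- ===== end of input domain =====

-- B counts the same subarrays grouped by END index with a counter of suffix products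
-- (equal products collapse to one entry); A scans start-grouped with nested loops. Objective: alternative.

-- ===== PORT A =====
-- inner loop body: test *= arr[j]; if test == K: count += 1
def innerStep (K : Int) (st : Int × Int) (v : Int) : Int × Int :=
  let t := st.1 * v
  (t, if t = K then st.2 + 1 else st.2)

-- outer loop body for index i (test is st.1, count is st.2; test reset to 1 when the inner loop ran)
def outerStep (arr : List Int) (K : Int) (st : Int × Int) (i : Int) : Int × Int :=
  let test := st.1 * PySem.List.pyGetD arr i 0
  let count := if test = K then st.2 + 1 else st.2
  if i + 1 < (arr.length : Int) then
    let st2 := (PySem.List.pyRange (i + 1) (arr.length : Int) 1).foldl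
      (fun acc j => innerStep K acc (PySem.List.pyGetD arr j 0)) (test, count)
    (1, st2.2)
  else (test, count)

def find_count (arr : List Int) (K : Int) : Int :=
  ((PySem.List.pyRange 0 (arr.length : Int) 1).foldl (outerStep arr K) (1, 0)).2

-- ===== PORT B =====
-- new[q] = new.get(q, 0) + c  for q = p*x, over the items of the previous counter
def rebuildStep (x : Int) (nd : PySem.Dict Int Int) (p : Int × Int) : PySem.Dict Int Int :=
  nd.modify (p.1 * x) 0 (· + p.2)

-- per-element body: rebuild the counter of suffix products, then count += new.get(K, 0)
def bStep (K : Int) (st : Int × PySem.Dict Int Int) (x : Int) : Int × PySem.Dict Int Int :=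
  let nd := (st.2.items.foldl (rebuildStep x) PySem.Dict.empty).modify x 0 (· + 1)
  (st.1 + nd.getD K 0, nd)

def find_count_alt (arr : List Int) (K : Int) : Int :=
  (arr.foldl (bStep K) (0, PySem.Dict.empty)).1

-- ===== PRECONDITION & SPEC =====
def Spec_find_count (arr : List Int) (K : Int) (out : Int) : Prop := out = find_count_alt arr K
instance (arr : List Int) (K : Int) (out : Int) : Decidable (Spec_find_count arr K out) := by unfold Spec_find_count; infer_instance

-- ===== CLAIM (what is proved, stated in full; the proofs are below) =====
def Claim_equal_find_count : Prop := ∀ (arr : List Int) (K : Int), Dom_find_count arr K → Spec_find_count arr K (find_count arr K)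

-- ===== LEMMAS AND PROOFS =====

-- running products of the prefixes of a list, seeded with t
def prodsFrom (t : Int) : List Int → List Int
  | [] => []
  | v :: vs => (t * v) :: prodsFrom (t * v) vs

-- products of all nonempty contiguous subarrays, grouped by start index
def AP : List Int → List Int
  | [] => []
  | v :: vs => prodsFrom 1 (v :: vs) ++ AP vs

-- seeds multiplied through all nonempty prefixes of the second list
def FF : List Int → List Int → List Int
  | _, [] => []
  | sp, x :: xs => sp.map (· * x) ++ FF (sp.map (· * x)) xs

-- products accumulated by B, grouped by end index, seeded with suffix products sp
def EE : List Int → List Int → List Int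
  | _, [] => []
  | sp, x :: xs => (sp.map (· * x) ++ [x]) ++ EE (sp.map (· * x) ++ [x]) xs

-- the dict is the counter of the list sp of products of subarrays ending at the previous index
def DRep (d : PySem.Dict Int Int) (sp : List Int) : Prop :=
  d.keys.Nodup ∧ (∀ v, v ∈ d.keys ↔ v ∈ sp) ∧ (∀ v, d.getD v 0 = (sp.count v : Int))

theorem innerStep_foldl (K : Int) : ∀ (xs : List Int) (t c : Int),
    xs.foldl (innerStep K) (t, c) = (xs.foldl (· * ·) t, c + ((prodsFrom t xs).count K : Int)) := by
  intro xs
  induction xs with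
  | nil => intro t c; simp [prodsFrom]
  | cons v vs ih =>
    intro t c
    simp only [List.foldl_cons, innerStep, prodsFrom, List.count_cons, ih]
    rcases eq_or_ne (t * v) K with h | h <;> simp [h] <;> push_cast <;> ring

theorem A_outer (arr : List Int) (K : Int) : ∀ (n a : Nat) (c : Int), n = arr.length - a →
    ((PySem.List.pyRange (a : Int) (arr.length : Int) 1).foldl (outerStep arr K) (1, c)).2
      = c + ((AP (arr.drop a)).count K : Int) := by
  intro n
  induction n with
  | zero =>
    intro a c hn
    have ha : arr.length ≤ a := by omega
    rw [PySem.List.pyRange_one_eq_nil (by exact_mod_cast ha)]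
    rw [List.drop_of_length_le ha]
    simp [AP]
  | succ n ih =>
    intro a c hn
    have ha : a < arr.length := by omega
    have hcast : ((a : Int)) < (arr.length : Int) := by exact_mod_cast ha
    rw [PySem.List.pyRange_one_cons hcast]
    rw [List.foldl_cons]
    have hget : PySem.List.pyGetD arr (a : Int) 0 = arr[a] := by
      simp [PySem.List.pyGetD_natCast, List.getD_eq_getElem?_getD, ha]
    have hdrop : arr.drop a = arr[a] :: arr.drop (a + 1) := List.drop_eq_getElem_cons ha
    by_cases hlt : (a : Int) + 1 < (arr.length : Int)
    · -- inner loop runs, test resets to 1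
      have hstep : outerStep arr K (1, c) (a : Int)
          = (1, (if 1 * arr[a] = K then c + 1 else c)
              + ((prodsFrom (1 * arr[a]) (arr.drop (a + 1))).count K : Int)) := by
        simp only [outerStep, hget, if_pos hlt]
        have h1 : ((a : Int) + 1) = ((a + 1 : Nat) : Int) := by push_cast; ring
        rw [h1, PySem.List.foldl_pyRange_pyGetD' arr 0 (innerStep K) _ (by positivity)]
        rw [innerStep_foldl]
        simp
      rw [hstep]
      have h1 : ((a : Int) + 1) = ((a + 1 : Nat) : Int) := by push_cast; ring
      rw [h1, ih (a + 1) _ (by omega)]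
      rw [hdrop]
      show _ = c + ((AP (arr[a] :: arr.drop (a+1))).count K : Int)
      simp only [AP, prodsFrom, List.count_append, List.count_cons, one_mul]
      rcases eq_or_ne arr[a] K with h | h <;> simp [h] <;> push_cast <;> ring
    · -- last index: no inner loop, the remaining range is empty
      have haeq : a + 1 = arr.length := by omega
      have hstep : outerStep arr K (1, c) (a : Int)
          = (1 * arr[a], if 1 * arr[a] = K then c + 1 else c) := by
        simp only [outerStep, hget, if_neg hlt]
      rw [hstep]
      have hnil : PySem.List.pyRange ((a : Int) + 1) (arr.length : Int) 1 = [] :=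
        PySem.List.pyRange_one_eq_nil (by omega)
      rw [hnil, List.foldl_nil]
      have hdrop2 : arr.drop (a + 1) = [] := List.drop_of_length_le (by omega)
      rw [hdrop, hdrop2]
      simp only [AP, prodsFrom, List.count_append, List.count_cons, one_mul]
      rcases eq_or_ne arr[a] K with h | h <;> simp [h]

theorem getD_rebuild_foldl (x : Int) : ∀ (l : List (Int × Int)) (d : PySem.Dict Int Int) (v : Int),
    (l.foldl (rebuildStep x) d).getD v 0
      = d.getD v 0 + ((l.filter (fun p => p.1 * x == v)).map (·.2)).sum := by
  intro l
  induction l with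
  | nil => intro d v; simp
  | cons p l ih =>
    intro d v
    rw [List.foldl_cons, ih]
    simp only [rebuildStep, PySem.Dict.getD_modify, List.filter_cons]
    rcases eq_or_ne v (p.1 * x) with h | h
    · simp [h]; ring
    · have : (p.1 * x == v) = false := by simp [Ne.symm h]
      simp [h, this]

theorem countSum (keys : List Int) (sp : List Int) (x v : Int) (hnd : keys.Nodup)
    (hmem : ∀ k, k ∈ keys ↔ k ∈ sp) :
    ((keys.filter (fun k => k * x == v)).map (fun k => (sp.count k : Int))).sum
      = ((sp.map (· * x)).count v : Int) := by
  have hperm : keys.Perm sp.dedup :=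
    (List.perm_ext_iff_of_nodup hnd (List.nodup_dedup sp)).mpr
      (fun a => (hmem a).trans (List.mem_dedup).symm)
  have h2 := ((hperm.filter (fun k => k * x == v)).map (fun k => (sp.count k : Int))).sum_eq
  rw [h2]
  have h3 : ((sp.dedup.filter (fun k => k * x == v)).map sp.count).sum
      = sp.countP (fun k => k * x == v) :=
    List.sum_map_count_dedup_filter_eq_countP _ _
  have h4 : (sp.map (· * x)).count v = sp.countP (fun k => k * x == v) := by
    simp [List.count, List.countP_map]; rfl
  rw [h4, ← h3]
  induction (sp.dedup.filter (fun k => k * x == v)) with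
  | nil => simp
  | cons a l ih2 => simp [ih2]

theorem rep_step (d : PySem.Dict Int Int) (sp : List Int) (x : Int) (h : DRep d sp) :
    DRep ((d.items.foldl (rebuildStep x) PySem.Dict.empty).modify x 0 (· + 1))
      (sp.map (· * x) ++ [x]) := by
  obtain ⟨hnd, hmem, hcnt⟩ := h
  have hitems : d.items = d.keys.map (fun k => (k, (sp.count k : Int))) := by
    rw [PySem.Dict.items_eq_map_keys d hnd 0]
    exact List.map_congr_left (fun k hk => by rw [hcnt k])
  have hFget : ∀ v, (d.items.foldl (rebuildStep x) PySem.Dict.empty).getD v 0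
      = ((sp.map (· * x)).count v : Int) := by
    intro v
    rw [getD_rebuild_foldl, hitems, List.filter_map, List.map_map]
    rw [PySem.Dict.getD_empty]
    simpa [Function.comp] using countSum d.keys sp x v hnd hmem
  have hFkeys : (d.items.foldl (rebuildStep x) PySem.Dict.empty).keys
      = PySem.Set.update PySem.Dict.empty.keys (d.items.map (fun p => p.1 * x)) :=
    PySem.Dict.keys_foldl_modify_key d.items (fun p => p.1 * x) 0 (fun _ p v => v + p.2)
      PySem.Dict.empty
  have hFnd : (d.items.foldl (rebuildStep x) PySem.Dict.empty).keys.Nodup :=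
    PySem.Dict.nodup_keys_foldl_modify_key d.items (fun p => p.1 * x) 0 (fun _ p v => v + p.2)
      PySem.Dict.empty (by simp [PySem.Dict.keys_empty])
  have hFmem : ∀ v, v ∈ (d.items.foldl (rebuildStep x) PySem.Dict.empty).keys
      ↔ v ∈ sp.map (· * x) := by
    intro v
    rw [hFkeys, PySem.Set.mem_update]
    rw [hitems, List.map_map]
    simp only [PySem.Dict.keys_empty, List.mem_nil_iff, false_or, List.mem_map, Function.comp]
    constructor
    · rintro ⟨k, hk, rfl⟩; exact ⟨k, (hmem k).1 hk, rfl⟩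
    · rintro ⟨k, hk, rfl⟩; exact ⟨k, (hmem k).2 hk, rfl⟩
  refine ⟨?_, ?_, ?_⟩
  · rw [PySem.Dict.keys_modify]
    exact PySem.Dict.nodup_keys_insert _ _ _ hFnd
  · intro v
    rw [PySem.Dict.keys_modify, PySem.Dict.mem_keys_insert]
    rw [hFmem v]
    simp [or_comm]
  · intro v
    rw [PySem.Dict.getD_modify, hFget]
    rcases eq_or_ne v x with h | h
    · simp [h, List.count_append]
    · have hx : (x == v) = false := by simp [Ne.symm h]
      rw [if_neg h, hFget v, List.count_append]
      simp [List.count_cons, hx]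

theorem B_fold (K : Int) : ∀ (xs : List Int) (c : Int) (d : PySem.Dict Int Int) (sp : List Int),
    DRep d sp → (xs.foldl (bStep K) (c, d)).1 = c + ((EE sp xs).count K : Int) := by
  intro xs
  induction xs with
  | nil => intro c d sp _; simp [EE]
  | cons x xs ih =>
    intro c d sp h
    have hrep := rep_step d sp x h
    rw [List.foldl_cons]
    show (xs.foldl (bStep K)
      (c + ((d.items.foldl (rebuildStep x) PySem.Dict.empty).modify x 0 (· + 1)).getD K 0,
       (d.items.foldl (rebuildStep x) PySem.Dict.empty).modify x 0 (· + 1))).1 = _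
    rw [ih _ _ _ hrep, hrep.2.2 K]
    show _ = c + ((EE sp (x :: xs)).count K : Int)
    simp only [EE, List.count_append]
    push_cast
    ring

theorem FF_nil : ∀ (xs : List Int), FF [] xs = [] := by
  intro xs; induction xs with
  | nil => rfl
  | cons x xs ih => simp [FF, ih]

theorem FF_single : ∀ (xs : List Int) (t : Int), FF [t] xs = prodsFrom t xs := by
  intro xs
  induction xs with
  | nil => intro t; rfl
  | cons x xs ih => intro t; simp [FF, prodsFrom, ih]

theorem FF_append_count : ∀ (xs a b : List Int) (v : Int),
    (FF (a ++ b) xs).count v = (FF a xs).count v + (FF b xs).count v := by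
  intro xs
  induction xs with
  | nil => intro a b v; simp [FF]
  | cons x xs ih =>
    intro a b v
    simp only [FF, List.map_append, List.count_append, ih]
    ring

theorem EE_count : ∀ (xs sp : List Int) (v : Int),
    (EE sp xs).count v = (FF sp xs).count v + (AP xs).count v := by
  intro xs
  induction xs with
  | nil => intro sp v; simp [EE, FF, AP]
  | cons x xs ih =>
    intro sp v
    simp only [EE, List.count_append, ih, FF_append_count, FF, FF_single]
    simp only [AP, prodsFrom, one_mul, List.count_append, List.count_cons, List.count_nil]
    ring

-- ===== VERDICT (by name: the statement is the Claim_ definition above) =====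
theorem find_count_spec : Claim_equal_find_count := by
  unfold Claim_equal_find_count
  intro arr K _
  unfold Spec_find_count
  have hA : find_count arr K = ((AP (arr.drop 0)).count K : Int) := by
    unfold find_count
    simpa using A_outer arr K (arr.length - 0) 0 0 rfl
  have hB : find_count_alt arr K = ((EE [] arr).count K : Int) := by
    unfold find_count_alt
    have hrep : DRep PySem.Dict.empty [] :=
      ⟨by simp [PySem.Dict.keys_empty], by simp [PySem.Dict.keys_empty], by simp⟩
    simpa using B_fold K arr 0 PySem.Dict.empty [] hrep
  rw [hA, hB, EE_count, FF_nil]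
  simp
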